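-- pv_equiv track=rewrite | github.com/MattTheRealYoung/DATA417_Individual_Cheng | spotify_recommend.py | check_name_in_library
-- ===== SOURCE A (Python) =====
-- def check_name_in_library(artists, library_name):
--     result= []
--     for item in library_name:
--         found = False
--         for artist in artists:
--             if artist in item:
--                 result.append(0)
--                 found = True
--                 break
--         if not found:
--             result.append(1)
--     return result
-- ===== SOURCE B (Python) =====
-- def check_name_in_library(artists, library_name):
--     # Prune redundant patterns: an artist that contains an already-kept
--     # artist as a substring can never change any item's classification.
--     kept = []
--     for a in artists:
--         if not any(k in a for k in kept):
--             kept.append(a)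
--     return [0 if any(k in item for k in kept) else 1 for item in library_name]
-- ===== Notes on version B (the rewrite author's own statement) =====
-- stated objective: alternative
-- what changed: B replaces A's per-item nested loop with break/flag by a preprocessing pass that prunes redundant artist patterns (any artist containing an already-kept artist as substring can never change an answer) followed by a single any-scan comprehension over the reduced pattern set.
import Mathlib
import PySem

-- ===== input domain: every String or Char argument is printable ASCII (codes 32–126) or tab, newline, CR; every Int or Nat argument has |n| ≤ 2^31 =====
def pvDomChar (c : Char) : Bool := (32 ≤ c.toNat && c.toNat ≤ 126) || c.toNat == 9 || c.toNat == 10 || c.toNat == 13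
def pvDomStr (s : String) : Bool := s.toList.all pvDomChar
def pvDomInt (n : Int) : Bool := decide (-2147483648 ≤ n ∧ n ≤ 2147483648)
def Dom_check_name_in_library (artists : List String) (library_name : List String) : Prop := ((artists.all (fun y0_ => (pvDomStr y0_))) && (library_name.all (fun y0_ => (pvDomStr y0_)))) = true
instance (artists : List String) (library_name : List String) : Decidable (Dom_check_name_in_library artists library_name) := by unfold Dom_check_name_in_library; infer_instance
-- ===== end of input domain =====

-- B prunes redundant artist patterns (those containing an already-kept artist as a
-- substring) in a preprocessing pass, then classifies each item by one any-scan over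
-- the reduced set; objective: alternative decomposition, same worst-case cost.

-- ===== PORT A =====
-- inner 'for artist in artists: if artist in item: result.append(0); found=True; break'
def cnlInner : List String → String → List Int → (List Int × Bool)
  | [], _, result => (result, false)
  | artist :: rest, item, result =>
      if PySem.Str.isIn artist item then (result ++ [(0 : Int)], true)
      else cnlInner rest item result

def check_name_in_library (artists : List String) (library_name : List String) : List Int :=
  library_name.foldl (fun result item =>
    let p := cnlInner artists item result
    if !p.2 then p.1 ++ [(1 : Int)] else p.1) []

-- ===== PORT B =====
def cnlKept (artists : List String) : List String :=
  artists.foldl (fun kept a =>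
    if kept.any (fun k => PySem.Str.isIn k a) then kept else kept ++ [a]) []

def check_name_in_library_alt (artists : List String) (library_name : List String) : List Int :=
  let kept := cnlKept artists
  library_name.map (fun item =>
    if kept.any (fun k => PySem.Str.isIn k item) then (0 : Int) else 1)

-- ===== PRECONDITION & SPEC =====
def Spec_check_name_in_library (artists : List String) (library_name : List String) (out : List Int) : Prop := out = check_name_in_library_alt artists library_name
instance (artists : List String) (library_name : List String) (out : List Int) : Decidable (Spec_check_name_in_library artists library_name out) := by unfold Spec_check_name_in_library; infer_instance

-- ===== CLAIM (what is proved, stated in full; the proofs are below) =====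
def Claim_equal_check_name_in_library : Prop := ∀ (artists : List String) (library_name : List String), Dom_check_name_in_library artists library_name → Spec_check_name_in_library artists library_name (check_name_in_library artists library_name)

-- ===== LEMMAS AND PROOFS =====

-- A's inner loop appends 0 and stops iff some artist is a substring of item.
theorem cnlInner_eq (artists : List String) (item : String) (result : List Int) :
    cnlInner artists item result =
      if (artists.any fun a => PySem.Str.isIn a item) = true then (result ++ [(0 : Int)], true)
      else (result, false) := by
  induction artists with
  | nil => simp [cnlInner]
  | cons a rest ih =>
      rw [cnlInner, ih, List.any_cons]
      by_cases h : PySem.Str.isIn a item = true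
      · rw [if_pos h, if_pos (by rw [h]; rfl)]
      · rw [if_neg h]
        by_cases h2 : (rest.any fun a => PySem.Str.isIn a item) = true
        · rw [if_pos h2, if_pos (by rw [h2, Bool.or_true])]
        · rw [if_neg h2, if_neg (by
            intro hc
            rcases (Bool.or_eq_true _ _).mp hc with hc | hc
            · exact h hc
            · exact h2 hc)]

-- A computes the pointwise classification over the full artist list.
theorem cnlA_aux (artists : List String) (lib : List String) (acc : List Int) :
    lib.foldl (fun result item =>
        let p := cnlInner artists item result
        if !p.2 then p.1 ++ [(1 : Int)] else p.1) acc
      = acc ++ lib.map (fun item =>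
          if (artists.any fun a => PySem.Str.isIn a item) = true then (0 : Int) else 1) := by
  induction lib generalizing acc with
  | nil => simp
  | cons it rest ih =>
      rw [List.foldl_cons, List.map_cons]
      have hstep : (let p := cnlInner artists it acc
          if !p.2 then p.1 ++ [(1 : Int)] else p.1)
          = acc ++ [if (artists.any fun a => PySem.Str.isIn a it) = true then (0 : Int) else 1] := by
        rw [show cnlInner artists it acc = _ from cnlInner_eq artists it acc]
        by_cases h : (artists.any fun a => PySem.Str.isIn a it) = true
        · rw [if_pos h, if_pos h]; rfl
        · rw [if_neg h, if_neg h]; rfl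
      rw [hstep, ih, List.append_assoc]
      rfl

theorem check_name_in_library_eq_map (artists : List String) (library_name : List String) :
    check_name_in_library artists library_name =
      library_name.map (fun item =>
        if (artists.any fun a => PySem.Str.isIn a item) = true then (0 : Int) else 1) := by
  unfold check_name_in_library
  rw [cnlA_aux]
  rfl

-- the pruning step, named for the lemmas below (definitionally cnlKept's fold step)
theorem cnlKept_eq (artists : List String) :
    cnlKept artists = artists.foldl (fun kept a =>
      if kept.any (fun k => PySem.Str.isIn k a) then kept else kept ++ [a]) [] := rfl

-- accumulator elements survive the fold
theorem cnlKept_mono (artists : List String) : ∀ (acc : List String), ∀ x ∈ acc,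
    x ∈ artists.foldl (fun kept a =>
      if kept.any (fun k => PySem.Str.isIn k a) then kept else kept ++ [a]) acc := by
  induction artists with
  | nil => intro acc x hx; exact hx
  | cons a rest ih =>
      intro acc x hx
      rw [List.foldl_cons]
      apply ih
      split_ifs
      · exact hx
      · exact List.mem_append.mpr (Or.inl hx)

-- every kept pattern came from the accumulator or the artist list
theorem cnlKept_subset_aux (artists : List String) : ∀ (acc : List String), ∀ k ∈
    artists.foldl (fun kept a =>
      if kept.any (fun k => PySem.Str.isIn k a) then kept else kept ++ [a]) acc,
    k ∈ acc ∨ k ∈ artists := by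
  induction artists with
  | nil => intro acc k hk; exact Or.inl hk
  | cons a rest ih =>
      intro acc k hk
      rw [List.foldl_cons] at hk
      rcases ih _ k hk with h | h
      · by_cases ha : (acc.any fun k => PySem.Str.isIn k a) = true
        · rw [if_pos ha] at h; exact Or.inl h
        · rw [if_neg ha] at h
          rcases List.mem_append.mp h with h | h
          · exact Or.inl h
          · exact Or.inr (by simp at h; simp [h])
      · exact Or.inr (List.mem_cons_of_mem _ h)

-- every artist has a kept pattern that is its substring
theorem cnlKept_covers_aux (artists : List String) : ∀ (acc : List String), ∀ a ∈ artists,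
    ∃ k ∈ artists.foldl (fun kept a =>
      if kept.any (fun k => PySem.Str.isIn k a) then kept else kept ++ [a]) acc,
    k.toList <:+: a.toList := by
  induction artists with
  | nil => intro acc a ha; cases ha
  | cons a rest ih =>
      intro acc x hx
      rw [List.foldl_cons]
      rcases List.mem_cons.mp hx with hx | hx
      · subst hx
        by_cases hm : (acc.any fun k => PySem.Str.isIn k x) = true
        · rw [if_pos hm]
          rcases List.any_eq_true.mp hm with ⟨k0, hk0, hk0in⟩
          exact ⟨k0, cnlKept_mono rest acc k0 hk0,
            (PySem.Str.isIn_iff_infix _ _).mp hk0in⟩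
        · rw [if_neg hm]
          exact ⟨x, cnlKept_mono rest _ x (List.mem_append.mpr (Or.inr (by simp))),
            List.infix_refl _⟩
      · exact ih _ x hx

-- matching over the pruned set coincides with matching over the full list
theorem any_kept_eq (artists : List String) (item : String) :
    ((cnlKept artists).any fun k => PySem.Str.isIn k item)
      = (artists.any fun a => PySem.Str.isIn a item) := by
  apply Bool.eq_iff_iff.mpr
  constructor
  · intro h
    rcases List.any_eq_true.mp h with ⟨k, hk, hkin⟩
    rw [cnlKept_eq] at hk
    rcases cnlKept_subset_aux artists [] k hk with h' | h'
    · cases h'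
    · exact List.any_eq_true.mpr ⟨k, h', hkin⟩
  · intro h
    rcases List.any_eq_true.mp h with ⟨a, ha, hain⟩
    rcases cnlKept_covers_aux artists [] a ha with ⟨k, hk, hinf⟩
    refine List.any_eq_true.mpr ⟨k, ?_, (PySem.Str.isIn_iff_infix _ _).mpr
      (hinf.trans ((PySem.Str.isIn_iff_infix _ _).mp hain))⟩
    rw [cnlKept_eq]; exact hk

-- ===== VERDICT (by name: the statement is the Claim_ definition above) =====
theorem check_name_in_library_spec : Claim_equal_check_name_in_library := by
  intro artists library_name _
  unfold Spec_check_name_in_library check_name_in_library_alt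
  rw [check_name_in_library_eq_map]
  apply List.map_congr_left
  intro item _
  rw [← any_kept_eq]
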